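-- pv_equiv track=rewrite | github.com/pooja4034/Python | Assignment/2.9.py | calculate_max_number
-- ===== SOURCE A (Python) =====
-- def calculate_max_number(num1, num2):
--     if num1 >= num2:
--         return -1
--
--     numbers = []
--
--     for num in range(num1, num2 + 1):
--         if sum_of_digits(num) % 3 == 0 and is_two_digit_number(num) and num % 5 == 0:
--             numbers.append(num)
--
--     if not numbers:
--         return -1
--
--     return max(numbers)
--
-- def sum_of_digits(number):
--     return sum(int(digit) for digit in str(number))
--
-- def is_two_digit_number(number):
--     return 10 <= number <= 99
-- ===== SOURCE B (Python) =====
-- def calculate_max_number(num1, num2):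
--     # A two-digit multiple of 5 with digit sum divisible by 3 is exactly a
--     # multiple of 15 in [15, 90]; take the largest one in [num1, num2] by arithmetic.
--     if num1 >= num2:
--         return -1
--     hi = min(num2, 90)
--     cand = hi - hi % 15
--     if cand >= max(num1, 15):
--         return cand
--     return -1
-- ===== Notes on version B (the rewrite author's own statement) =====
-- stated objective: faster
-- what changed: Replaces the full range scan with digit-sum tests and list building by O(1) arithmetic: a qualifying number is exactly a multiple of 15 in [15,90], so B clamps the interval and computes the largest such multiple directly.
-- crash fix: When num1 < num2 and num1 < 0 the range contains a negative number and A raises ValueError (int('-') on the sign character of str(num)); B returns the intended maximum (or -1) there. — e.g. on calculate_max_number(-2, 20): A raises ValueError, B returns 15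
import Mathlib
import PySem

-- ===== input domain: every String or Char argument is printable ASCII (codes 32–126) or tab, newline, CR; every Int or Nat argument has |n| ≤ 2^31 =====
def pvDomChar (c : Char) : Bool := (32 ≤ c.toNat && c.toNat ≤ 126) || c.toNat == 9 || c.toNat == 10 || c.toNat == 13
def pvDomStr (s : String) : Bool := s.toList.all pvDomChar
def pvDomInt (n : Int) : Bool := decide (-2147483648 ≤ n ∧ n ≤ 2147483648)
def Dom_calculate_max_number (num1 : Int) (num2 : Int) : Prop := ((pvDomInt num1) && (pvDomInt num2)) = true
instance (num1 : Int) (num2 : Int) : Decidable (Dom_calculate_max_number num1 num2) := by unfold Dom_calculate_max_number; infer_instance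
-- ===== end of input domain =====

-- B replaces A's range scan (digit sums + list building + max) by O(1) arithmetic on
-- the clamped interval; B also returns a value where A raises ValueError (negative nums).

-- ===== PORT A =====
-- sum(int(digit) for digit in str(number)); int('-') raises ValueError in Python —
-- here .getD 0 stands in for that raise, and Pre_ excludes exactly those inputs.
def pv_sum_of_digits (number : Int) : Int :=
  ((PySem.Int.toChars number).map (fun d => (PySem.Int.ofChars? [d]).getD 0)).sum

def pv_is_two_digit_number (number : Int) : Bool :=
  decide (10 ≤ number ∧ number ≤ 99)

-- the loop body's test, named so the filter lemmas can cite it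
def pvCond (num : Int) : Bool :=
  PySem.Int.mod (pv_sum_of_digits num) 3 == 0 && pv_is_two_digit_number num
    && PySem.Int.mod num 5 == 0

def calculate_max_number (num1 : Int) (num2 : Int) : Int :=
  if num1 ≥ num2 then -1
  else
    let numbers := (PySem.List.pyRange num1 (num2 + 1) 1).foldl
      (fun acc num => if pvCond num then acc ++ [num] else acc) []
    if numbers.isEmpty then -1
    else
      match PySem.List.max? numbers (fun x => x) with
      | some m => m
      | none => -1     -- unreachable: numbers is nonempty

-- ===== PORT B =====
def calculate_max_number_alt (num1 : Int) (num2 : Int) : Int :=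
  if num1 ≥ num2 then -1
  else
    let hi := min num2 90
    let cand := hi - PySem.Int.mod hi 15
    if cand ≥ max num1 15 then cand else -1

-- ===== PRECONDITION & SPEC =====
-- Pre_ excludes num1 < num2 with num1 < 0: there the loop reaches a negative num and
-- Python's int('-') raises ValueError inside sum_of_digits.
def Pre_calculate_max_number (num1 : Int) (num2 : Int) : Prop :=
  num2 ≤ num1 ∨ 0 ≤ num1
instance (num1 : Int) (num2 : Int) : Decidable (Pre_calculate_max_number num1 num2) := by
  unfold Pre_calculate_max_number; infer_instance

def pvWitness_calculate_max_number : Int × Int := (10, 100)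

-- When num1 < num2 and num1 < 0, A raises ValueError and B returns the intended result.
def Raises_calculate_max_number (num1 : Int) (num2 : Int) : Prop :=
  num1 < num2 ∧ num1 < 0
instance (num1 : Int) (num2 : Int) : Decidable (Raises_calculate_max_number num1 num2) := by
  unfold Raises_calculate_max_number; infer_instance
def pvRaiseWitness_calculate_max_number : Int × Int := (-2, 20)
def pvRaiseWitnessOut_calculate_max_number : Int := 15

def Spec_calculate_max_number (num1 : Int) (num2 : Int) (out : Int) : Prop :=
  out = calculate_max_number_alt num1 num2
instance (num1 : Int) (num2 : Int) (out : Int) : Decidable (Spec_calculate_max_number num1 num2 out) := by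
  unfold Spec_calculate_max_number; infer_instance

-- ===== CLAIM (what is proved, stated in full; the proofs are below) =====
def Claim_equal_calculate_max_number : Prop := ∀ (num1 : Int) (num2 : Int), Dom_calculate_max_number num1 num2 → Pre_calculate_max_number num1 num2 → Spec_calculate_max_number num1 num2 (calculate_max_number num1 num2)

def Claim_raises_calculate_max_number : Prop := (∀ (num1 : Int) (num2 : Int), Dom_calculate_max_number num1 num2 → Raises_calculate_max_number num1 num2 → ¬ Pre_calculate_max_number num1 num2) ∧ (Dom_calculate_max_number (pvRaiseWitness_calculate_max_number.1) (pvRaiseWitness_calculate_max_number.2) ∧ Raises_calculate_max_number (pvRaiseWitness_calculate_max_number.1) (pvRaiseWitness_calculate_max_number.2) ∧ calculate_max_number_alt (pvRaiseWitness_calculate_max_number.1) (pvRaiseWitness_calculate_max_number.2) = pvRaiseWitnessOut_calculate_max_number)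

-- ===== LEMMAS AND PROOFS =====

-- the loop test holds exactly on multiples of 15 in [15, 90] (for nonnegative num)
lemma pvCond_iff (n : Int) (hn : 0 ≤ n) :
    pvCond n = true ↔ (15 ∣ n ∧ 15 ≤ n ∧ n ≤ 90) := by
  by_cases h : 10 ≤ n ∧ n ≤ 99
  · obtain ⟨h1, h2⟩ := h
    interval_cases n <;> decide
  · constructor
    · intro hc
      exfalso
      simp only [pvCond, pv_is_two_digit_number, Bool.and_eq_true, decide_eq_true_eq] at hc
      exact h ⟨hc.1.2.1, hc.1.2.2⟩
    · rintro ⟨_, h15, h90⟩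
      exact absurd ⟨by omega, by omega⟩ h

lemma filter_cond_eq_nil (a b : Int) (ha : 0 ≤ a)
    (h : ¬ (min b 90 - PySem.Int.mod (min b 90) 15 ≥ max a 15)) :
    (PySem.List.pyRange a (b + 1) 1).filter pvCond = [] := by
  rw [PySem.Int.mod_eq_emod_of_pos (by omega)] at h
  rw [List.filter_eq_nil_iff]
  intro x hx
  rw [PySem.List.mem_pyRange_one] at hx
  intro hc
  rw [pvCond_iff x (by omega)] at hc
  obtain ⟨hd, h15, h90⟩ := hc
  omega

lemma mem_filter_cond (a b : Int) (ha : 0 ≤ a)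
    (h : min b 90 - PySem.Int.mod (min b 90) 15 ≥ max a 15) :
    (min b 90 - PySem.Int.mod (min b 90) 15) ∈ (PySem.List.pyRange a (b + 1) 1).filter pvCond := by
  rw [PySem.Int.mod_eq_emod_of_pos (by omega)] at h ⊢
  rw [List.mem_filter, PySem.List.mem_pyRange_one,
    pvCond_iff _ (by omega)]
  refine ⟨⟨by omega, by omega⟩, ⟨?_, by omega, by omega⟩⟩
  omega

lemma filter_cond_le (a b x : Int) (ha : 0 ≤ a)
    (hx : x ∈ (PySem.List.pyRange a (b + 1) 1).filter pvCond) :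
    x ≤ min b 90 - PySem.Int.mod (min b 90) 15 := by
  rw [PySem.Int.mod_eq_emod_of_pos (by omega)]
  rw [List.mem_filter, PySem.List.mem_pyRange_one] at hx
  obtain ⟨⟨hax, hxb⟩, hc⟩ := hx
  rw [pvCond_iff x (by omega)] at hc
  obtain ⟨hd, h15, h90⟩ := hc
  omega

-- ===== VERDICT (by name: the statement is the Claim_ definition above) =====
theorem calculate_max_number_spec : Claim_equal_calculate_max_number := by
  intro num1 num2 _ hpre
  unfold Spec_calculate_max_number calculate_max_number calculate_max_number_alt
  by_cases hge : num1 ≥ num2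
  · simp [hge]
  · have ha : 0 ≤ num1 := by
      rcases hpre with h | h
      · omega
      · exact h
    simp only [hge, if_false]
    rw [PySem.List.foldl_append_if_eq_filter]
    simp only [List.nil_append]
    set L := (PySem.List.pyRange num1 (num2 + 1) 1).filter pvCond with hL
    by_cases hc : min num2 90 - PySem.Int.mod (min num2 90) 15 ≥ max num1 15
    · have hmem := mem_filter_cond num1 num2 ha hc
      rw [← hL] at hmem
      have hne : L ≠ [] := by intro h; rw [h] at hmem; exact absurd hmem (List.not_mem_nil)
      simp only [List.isEmpty_iff, hne, if_false, hc, if_pos]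
      cases hm : PySem.List.max? L (fun x => x) with
      | none =>
        exact absurd ((PySem.List.max?_eq_none_iff L (fun x => x)).mp hm) hne
      | some m =>
        have hmmem := PySem.List.max?_mem hm
        have hmax := PySem.List.max?_isMax hm
        have h1 : m ≤ min num2 90 - PySem.Int.mod (min num2 90) 15 :=
          filter_cond_le num1 num2 m ha (hL ▸ hmmem)
        have h2 : (min num2 90 - PySem.Int.mod (min num2 90) 15) ≤ m := hmax _ hmem
        show m = min num2 90 - PySem.Int.mod (min num2 90) 15
        omega
    · have hnil : L = [] := filter_cond_eq_nil num1 num2 ha hc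
      simp only [hnil, List.isEmpty_nil, if_true]
      rw [if_neg hc]

@[simp] theorem calculate_max_number_raises : Claim_raises_calculate_max_number := by
  unfold Claim_raises_calculate_max_number
  constructor
  · intro num1 num2 _ hr
    unfold Raises_calculate_max_number at hr
    unfold Pre_calculate_max_number
    omega
  · exact ⟨by decide, by decide, by decide⟩
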